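-- pv_equiv track=rewrite | github.com/barszu/ASD | nauka1/do egzaminu/probne wozniaka/egz3/p3b/egzP3b.py | lufthansa
-- ===== SOURCE A (Python) =====
-- class Node:
--     def __init__(self, value):
--         self.parent = self
--         self.rank = 0 #ilosc el w tym zbiorze w ktorym jest node ->
--         # wyplynie i zawsze prawdziwe bedzie dla roota zbioru
--         # -> tutaj (w tej impelemtavji) mowi to tyle ze ile ma dzieci #gdyby startowo = 1 to dzieci + 1 = size_of_tree
--         self.value = value
--
-- def find_set(x: Node): #find oryginal parent
--     #znajduje reprezentacja zbioru do ktorego nalezy x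
--     if x.parent != x:
--         x.parent = find_set(x.parent)  # kompresja ścieżki
--     return x.parent
--
-- def union(x: Node, y: Node):
--     # polaczenie dwoch zbiorow A B do ktorych nalezy x , y
--     x = find_set(x)
--     y = find_set(y)
--     if x.rank > y.rank:
--         y.parent = x
--     else:
--         x.parent = y
--         if x.rank == y.rank:
--             y.rank += 1
--
-- def kruskal(edges_tab, v_no): #edges=[(u,v,waga)]
--     # Inicjalizacja zbiorów rozłącznych
--     nodes = [Node(i) for i in range(v_no)] #nodes dla wierzcholkow
--
--     max_sum = 0
--     added_extra = False
--
--     for e in reversed(edges_tab):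
--         u, v, weight = e
--         if find_set(nodes[u]) != find_set(nodes[v]): #nodes[u] - obiekt_u (parent,rank,value)
--             #u,v naleza do innych zbiorow
--             max_sum += weight
--             union(nodes[u], nodes[v])
--         elif not added_extra: #krawedz nie pasuje do MST, ale jest 1 gruba rybą
--             added_extra = True
--             max_sum += weight
--
--     return max_sum
--
-- def lufthansa ( G ):
--     #tutaj proszę wpisać własną implementację
--     # max spanning tree + 1 krawedz kolidujaca
--     n = len(G)
--     used_edges = [ [False for i in range(n)] for j in range(n)]
--     E = [] #(u,v,weight)
--     #conwert graph
--     all_weight = 0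
--     for u in range(n):
--         for ( v , weight ) in G[u]:
--             if used_edges[u][v]: continue
--             E.append((u,v,weight))
--             all_weight += weight
--             used_edges[u][v] = True
--             used_edges[v][u] = True
--     E.sort(key = lambda x: x[2])
--     #uruchom kruskala i dodaj najciezsza niepasujaca
--     max_taken_sum = kruskal(E,n)
--
--     return all_weight-max_taken_sum
-- ===== SOURCE B (Python) =====
-- def lufthansa(G):
--     # max spanning forest + one heaviest colliding edge:
--     # sum the rejected (cycle-closing) edges, skipping the heaviest one.
--     n = len(G)
--     seen = [[False] * n for _ in range(n)]
--     E = []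
--     for u in range(n):
--         for v, w in G[u]:
--             if not seen[u][v]:
--                 seen[u][v] = seen[v][u] = True
--                 E.append((u, v, w))
--     E.sort(key=lambda e: e[2])
--     comp = list(range(n))
--     res = 0
--     skipped = False
--     for u, v, w in reversed(E):
--         cu, cv = comp[u], comp[v]
--         if cu != cv:
--             comp = [cu if c == cv else c for c in comp]
--         elif skipped:
--             res += w
--         else:
--             skipped = True
--     return res
-- ===== Notes on version B (the rewrite author's own statement) =====
-- stated objective: alternative
-- what changed: Kruskal with a rank/path-compression union-find plus an all_weight subtraction is replaced by a component-relabelling greedy over the same descending edge order that directly sums the rejected (cycle-closing) edge weights, skipping the first (heaviest) one; Pre_ excludes only the inputs on which A raises IndexError (a neighbour index outside [-len(G), len(G))).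
-- outside the precondition, e.g. on lufthansa([[(2, 5)]]): A raises IndexError, B raises IndexError
import Mathlib
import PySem

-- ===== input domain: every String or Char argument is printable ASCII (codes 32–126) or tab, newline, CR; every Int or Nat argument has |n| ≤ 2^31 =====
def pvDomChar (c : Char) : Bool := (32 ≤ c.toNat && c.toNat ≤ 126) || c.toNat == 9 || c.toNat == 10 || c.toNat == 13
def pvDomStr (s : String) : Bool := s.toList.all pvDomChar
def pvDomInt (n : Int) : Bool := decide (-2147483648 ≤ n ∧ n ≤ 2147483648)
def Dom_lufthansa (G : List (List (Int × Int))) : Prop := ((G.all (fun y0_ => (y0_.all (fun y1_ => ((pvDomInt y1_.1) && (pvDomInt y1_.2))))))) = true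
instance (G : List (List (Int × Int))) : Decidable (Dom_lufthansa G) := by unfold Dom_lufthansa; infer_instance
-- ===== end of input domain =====

-- B replaces A's Kruskal (sorted edges + rank/path-compression union-find + all_weight minus taken
-- weight) by a component-relabelling greedy over the same edge order that directly sums the
-- rejected (cycle) edges, skipping the first (heaviest) one.  Same cost class; objective:
-- alternative algorithm.

-- ===== PORT A =====
-- union-find over node indices (A's Node objects, by index): parents / ranks as lists.
-- find_set with path compression; the fuel (vno+1) is always sufficient: a terminating parent
-- chain over vno nodes visits distinct nodes (lemma shortRoot below), so the Python recursion
-- never needs more than vno steps.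

def findA : Nat → List Nat → Nat → Nat × List Nat
  | 0, p, x => (x, p)
  | fuel+1, p, x =>
    if p.getD x x = x then (x, p)
    else
      let r := findA fuel p (p.getD x x)
      (r.1, r.2.set x r.1)

def unionA (fuel : Nat) (p rk : List Nat) (x y : Nat) : List Nat × List Nat :=
  let fx := findA fuel p x
  let fy := findA fuel fx.2 y
  if rk.getD fx.1 0 > rk.getD fy.1 0 then ((fy.2).set fy.1 fx.1, rk)
  else
    let p2 := (fy.2).set fx.1 fy.1
    if rk.getD fx.1 0 = rk.getD fy.1 0 then (p2, rk.set fy.1 (rk.getD fy.1 0 + 1)) else (p2, rk)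

-- one iteration of kruskal's loop body (state: parents, ranks, max_sum, added_extra)
def kruskalStep (vno : Nat) (st : List Nat × List Nat × Int × Bool) (e : Int × Int × Int) :
    List Nat × List Nat × Int × Bool :=
  let u := PySem.List.pyGetD (List.range vno) e.1 0
  let v := PySem.List.pyGetD (List.range vno) e.2.1 0
  let f1 := findA (vno+1) st.1 u
  let f2 := findA (vno+1) f1.2 v
  if f1.1 ≠ f2.1 then
    let pr := unionA (vno+1) f2.2 st.2.1 u v
    (pr.1, pr.2, st.2.2.1 + e.2.2, st.2.2.2)
  else if st.2.2.2 = false then (f2.2, st.2.1, st.2.2.1 + e.2.2, true)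
  else (f2.2, st.2.1, st.2.2.1, st.2.2.2)

def kruskalA (edges : List (Int × Int × Int)) (vno : Nat) : Int :=
  (edges.reverse.foldl (kruskalStep vno)
    (List.range vno, List.replicate vno 0, 0, false)).2.2.1

-- graph-conversion loop body of A (state: used_edges matrix, E, all_weight)
def buildInnerA (u : Int) (st : List (List Bool) × List (Int × Int × Int) × Int)
    (vw : Int × Int) : List (List Bool) × List (Int × Int × Int) × Int :=
  if PySem.List.pyGetD (PySem.List.pyGetD st.1 u []) vw.1 false then st
  else
    let used1 := PySem.List.pySetD st.1 u (PySem.List.pySetD (PySem.List.pyGetD st.1 u []) vw.1 true)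
    let used2 := PySem.List.pySetD used1 vw.1 (PySem.List.pySetD (PySem.List.pyGetD used1 vw.1 []) u true)
    (used2, st.2.1 ++ [(u, vw.1, vw.2)], st.2.2 + vw.2)

def buildOuterA (G : List (List (Int × Int))) (st : List (List Bool) × List (Int × Int × Int) × Int)
    (u : Int) : List (List Bool) × List (Int × Int × Int) × Int :=
  (PySem.List.pyGetD G u []).foldl (buildInnerA u) st

def lufthansa (G : List (List (Int × Int))) : Int :=
  let n := G.length
  let b := (PySem.List.pyRange 0 n 1).foldl (buildOuterA G)
    (List.replicate n (List.replicate n false), [], 0)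
  let es := PySem.List.sorted b.2.1 (fun e => e.2.2) false
  b.2.2 - kruskalA es n

-- ===== PORT B =====
-- B's conversion loop body (state: seen matrix, E)
def buildInnerB (u : Int) (st : List (List Bool) × List (Int × Int × Int))
    (vw : Int × Int) : List (List Bool) × List (Int × Int × Int) :=
  if PySem.List.pyGetD (PySem.List.pyGetD st.1 u []) vw.1 false then st
  else
    let s1 := PySem.List.pySetD st.1 u (PySem.List.pySetD (PySem.List.pyGetD st.1 u []) vw.1 true)
    let s2 := PySem.List.pySetD s1 vw.1 (PySem.List.pySetD (PySem.List.pyGetD s1 vw.1 []) u true)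
    (s2, st.2 ++ [(u, vw.1, vw.2)])

def buildOuterB (G : List (List (Int × Int)))
    (st : List (List Bool) × List (Int × Int × Int)) (u : Int) :
    List (List Bool) × List (Int × Int × Int) :=
  (PySem.List.pyGetD G u []).foldl (buildInnerB u) st

-- B's greedy loop body (state: component labels, res = rejected-weight sum, skipped flag)
def mstStepB (st : List Int × Int × Bool) (e : Int × Int × Int) : List Int × Int × Bool :=
  let cu := PySem.List.pyGetD st.1 e.1 0
  let cv := PySem.List.pyGetD st.1 e.2.1 0
  if cu ≠ cv then (st.1.map (fun c => if c = cv then cu else c), st.2)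
  else if st.2.2 then (st.1, st.2.1 + e.2.2, true)
  else (st.1, st.2.1, true)

def lufthansa_alt (G : List (List (Int × Int))) : Int :=
  let n := G.length
  let b := (PySem.List.pyRange 0 n 1).foldl (buildOuterB G)
    (List.replicate n (List.replicate n false), [])
  let es := PySem.List.sorted b.2 (fun e => e.2.2) false
  (es.reverse.foldl mstStepB (PySem.List.pyRange 0 n 1, 0, false)).2.1

-- ===== PRECONDITION & SPEC =====
-- Pre_ excludes exactly the inputs on which A raises IndexError: a neighbour index outside
-- [-len(G), len(G)) (Python raises on used_edges[u][v]; in-range negative indices are kept).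
def Pre_lufthansa (G : List (List (Int × Int))) : Prop :=
  ∀ row ∈ G, ∀ vw ∈ row, -(G.length : Int) ≤ vw.1 ∧ vw.1 < (G.length : Int)
instance (G : List (List (Int × Int))) : Decidable (Pre_lufthansa G) := by
  unfold Pre_lufthansa; infer_instance

def pvWitness_lufthansa : (List (List (Int × Int))) := [[(1, 7)], [(-2, 3), (1, 1)]]

def Spec_lufthansa (G : List (List (Int × Int))) (out : Int) : Prop := out = lufthansa_alt G
instance (G : List (List (Int × Int))) (out : Int) : Decidable (Spec_lufthansa G out) := by
  unfold Spec_lufthansa; infer_instance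

-- ===== CLAIM (what is proved, stated in full; the proofs are below) =====
def Claim_equal_lufthansa : Prop :=
  ∀ (G : List (List (Int × Int))), Dom_lufthansa G → Pre_lufthansa G →
    Spec_lufthansa G (lufthansa G)

-- ===== LEMMAS AND PROOFS =====

def stepP (p : List Nat) (x : Nat) : Nat := p.getD x x

def rootAux : Nat → List Nat → Nat → Option Nat
  | 0, _, _ => none
  | f+1, p, x => if p.getD x x = x then some x else rootAux f p (p.getD x x)

def RootRel (p : List Nat) (x s : Nat) : Prop := ∃ f, rootAux f p x = some s

def iterN (p : List Nat) : Nat → Nat → Nat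
  | 0, x => x
  | k+1, x => iterN p k (stepP p x)

def Reach (p : List Nat) (x y : Nat) : Prop := ∃ k, iterN p k x = y

def RangeOK (n : Nat) (p : List Nat) : Prop := p.length = n ∧ ∀ i, i < n → stepP p i < n

theorem rootAux_mono {p : List Nat} {f g x s : Nat} (h : rootAux f p x = some s) (hfg : f ≤ g) :
    rootAux g p x = some s := by
  induction f generalizing x g with
  | zero => simp [rootAux] at h
  | succ f ih =>
    obtain ⟨g', rfl⟩ : ∃ g', g = g' + 1 := ⟨g - 1, by omega⟩
    rw [rootAux] at h ⊢
    by_cases hfix : p.getD x x = x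
    · rwa [if_pos hfix] at h ⊢
    · rw [if_neg hfix] at h ⊢; exact ih h (by omega)

theorem rootRel_det {p : List Nat} {x s t : Nat} (hs : RootRel p x s) (ht : RootRel p x t) :
    s = t := by
  obtain ⟨f, hf⟩ := hs; obtain ⟨g, hg⟩ := ht
  have h1 := rootAux_mono hf (Nat.le_max_left f g)
  have h2 := rootAux_mono hg (Nat.le_max_right f g)
  rw [h1] at h2; exact Option.some.inj h2

theorem rootAux_isRoot {p : List Nat} {f x s : Nat} (h : rootAux f p x = some s) :
    stepP p s = s := by
  induction f generalizing x with
  | zero => simp [rootAux] at h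
  | succ f ih =>
    rw [rootAux] at h
    split at h
    · obtain rfl := Option.some.inj h; assumption
    · exact ih h

theorem rootAux_range {n : Nat} {p : List Nat} {f x s : Nat} (hR : RangeOK n p) (hx : x < n)
    (h : rootAux f p x = some s) : s < n := by
  induction f generalizing x with
  | zero => simp [rootAux] at h
  | succ f ih =>
    rw [rootAux] at h
    split at h
    · obtain rfl := Option.some.inj h; exact hx
    · exact ih (hR.2 x hx) h

theorem rootRel_of_isRoot {p : List Nat} {x : Nat} (h : stepP p x = x) : RootRel p x x :=
  ⟨1, by simp [rootAux, stepP] at h ⊢; exact h⟩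

theorem rootRel_step {p : List Nat} {x s : Nat} (hne : stepP p x ≠ x) :
    (RootRel p x s ↔ RootRel p (stepP p x) s) := by
  simp only [stepP] at hne ⊢
  constructor
  · rintro ⟨f, hf⟩
    cases f with
    | zero => simp [rootAux] at hf
    | succ f => rw [rootAux, if_neg hne] at hf; exact ⟨f, hf⟩
  · rintro ⟨f, hf⟩
    exact ⟨f + 1, by rw [rootAux, if_neg hne]; exact hf⟩

theorem iterN_add (p : List Nat) (a b x : Nat) : iterN p (a + b) x = iterN p b (iterN p a x) := by
  induction a generalizing x with
  | zero => simp [iterN]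
  | succ a ih =>
    have : a + 1 + b = (a + b) + 1 := by omega
    rw [this, iterN, iterN, ih]

theorem iterN_absorb {p : List Nat} {s : Nat} (h : stepP p s = s) (k : Nat) : iterN p k s = s := by
  induction k with
  | zero => rfl
  | succ k ih => rw [iterN, h]; exact ih

theorem rootAux_eventually {p : List Nat} {f x s : Nat} (h : rootAux f p x = some s) :
    ∃ m, ∀ t, m ≤ t → iterN p t x = s := by
  induction f generalizing x with
  | zero => simp [rootAux] at h
  | succ f ih =>
    rw [rootAux] at h
    split at h
    · obtain rfl := Option.some.inj h
      exact ⟨0, fun t _ => iterN_absorb ‹_› t⟩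
    · obtain ⟨m, hm⟩ := ih h
      refine ⟨m + 1, fun t ht => ?_⟩
      obtain ⟨t', rfl⟩ : ∃ t', t = t' + 1 := ⟨t - 1, by omega⟩
      rw [iterN]
      exact hm t' (by omega)

theorem noRevisit {p : List Nat} {x s : Nat} (hne : stepP p x ≠ x) (hr : RootRel p x s) :
    ¬ Reach p (stepP p x) x := by
  rintro ⟨k, hk⟩
  have hper : iterN p (k + 1) x = x := by rw [iterN]; exact hk
  have hperiod : ∀ j, iterN p (j * (k + 1)) x = x := by
    intro j
    induction j with
    | zero => simp [iterN]
    | succ j ih =>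
      have : (j + 1) * (k + 1) = j * (k + 1) + (k + 1) := by ring
      rw [this, iterN_add, ih, hper]
  obtain ⟨f, hf⟩ := hr
  obtain ⟨m, hm⟩ := rootAux_eventually hf
  have hx : iterN p (m * (k + 1)) x = s := hm _ (Nat.le_mul_of_pos_right m (by omega))
  rw [hperiod m] at hx
  subst hx
  exact hne (rootAux_isRoot hf)

theorem shortAux {n : Nat} {p : List Nat} (hR : RangeOK n p) :
    ∀ (f x s : Nat) (V : Finset Nat), x < n → x ∉ V →
      (∀ v ∈ V, v < n ∧ Reach p v x ∧ v ≠ x) → rootAux f p x = some s →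
      rootAux (n + 1 - V.card) p x = some s := by
  intro f
  induction f with
  | zero => intro x s V _ _ _ h; simp [rootAux] at h
  | succ f ih =>
    intro x s V hx hxV hV h
    have hsub : insert x V ⊆ Finset.range n := by
      intro v hv
      rcases Finset.mem_insert.mp hv with rfl | hv
      · exact Finset.mem_range.mpr hx
      · exact Finset.mem_range.mpr (hV v hv).1
    have hcard : V.card + 1 ≤ n := by
      have := Finset.card_le_card hsub
      rwa [Finset.card_insert_of_notMem hxV, Finset.card_range] at this
    obtain ⟨c, hc⟩ : ∃ c, n + 1 - V.card = c + 1 := ⟨n - V.card, by omega⟩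
    rw [hc, rootAux]
    rw [rootAux] at h
    by_cases hfix : p.getD x x = x
    · rw [if_pos hfix] at h ⊢; exact h
    · rw [if_neg hfix] at h ⊢
      have hrel : RootRel p x s := ⟨f + 1, by rw [rootAux, if_neg hfix]; exact h⟩
      have hne : stepP p x ≠ x := hfix
      have hyx : ¬ Reach p (stepP p x) x := noRevisit hne hrel
      have hyn : stepP p x < n := hR.2 x hx
      have hynotin : stepP p x ∉ insert x V := by
        intro hmem
        rcases Finset.mem_insert.mp hmem with heq | hmem
        · exact hfix heq
        · exact hyx (hV _ hmem).2.1
      have hinv : ∀ v ∈ insert x V, v < n ∧ Reach p v (stepP p x) ∧ v ≠ stepP p x := by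
        intro v hv
        have hvy : v ≠ stepP p x := fun hvy => hynotin (hvy ▸ hv)
        rcases Finset.mem_insert.mp hv with rfl | hv
        · exact ⟨hx, ⟨1, rfl⟩, hvy⟩
        · obtain ⟨hvn, ⟨k, hk⟩, _⟩ := hV v hv
          exact ⟨hvn, ⟨k + 1, by rw [iterN_add p k 1, hk]; rfl⟩, hvy⟩
      have := ih (stepP p x) s (insert x V) hyn hynotin hinv h
      rw [Finset.card_insert_of_notMem hxV] at this
      have heq : n + 1 - (V.card + 1) = c := by omega
      rw [heq] at this
      exact this

theorem shortRoot {n : Nat} {p : List Nat} {x s : Nat} (hR : RangeOK n p) (hx : x < n)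
    (hr : RootRel p x s) : rootAux (n + 1) p x = some s := by
  obtain ⟨f, hf⟩ := hr
  have := shortAux hR f x s ∅ hx (Finset.notMem_empty x) (by simp) hf
  simpa using this

def Valid (n : Nat) (p : List Nat) : Prop := RangeOK n p ∧ ∀ i, i < n → ∃ s, RootRel p i s

def SameClass (p : List Nat) (i j : Nat) : Prop := ∃ s, RootRel p i s ∧ RootRel p j s

theorem getD_set' (xs : List Nat) (k i v d : Nat) :
    (xs.set k v).getD i d = if k = i ∧ k < xs.length then v else xs.getD i d := by
  rcases eq_or_ne k i with rfl | hne
  · by_cases hl : k < xs.length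
    · simp [List.getD_eq_getElem?_getD, List.getElem?_set_self hl, hl]
    · rw [List.set_eq_of_length_le (by omega), if_neg (fun h => hl h.2)]
  · simp [List.getD_eq_getElem?_getD, List.getElem?_set_ne hne, hne]

theorem stepP_set (p : List Nat) (x rt y : Nat) :
    stepP (p.set x rt) y = if x = y ∧ x < p.length then rt else stepP p y := by
  unfold stepP
  rw [getD_set']

theorem set_preserves {p : List Nat} {x rt : Nat} (hxl : x < p.length)
    (hroot : stepP p rt = rt) (huniq : ∀ t, RootRel p x t → t = rt) :
    ∀ z t, RootRel p z t → RootRel (p.set x rt) z t := by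
  have main : ∀ f z t, rootAux f p z = some t → RootRel (p.set x rt) z t := by
    intro f
    induction f with
    | zero => intro z t h; simp [rootAux] at h
    | succ f ih =>
      intro z t h
      rcases eq_or_ne z x with rfl | hzx
      · have ht : t = rt := huniq t ⟨f + 1, h⟩
        subst ht
        have hq : stepP (p.set z t) z = t := by rw [stepP_set, if_pos ⟨rfl, hxl⟩]
        rcases eq_or_ne t z with rfl | hrtz
        · exact rootRel_of_isRoot hq
        · have hq2 : stepP (p.set z t) t = t := by
            rw [stepP_set, if_neg (fun hc => hrtz hc.1.symm)]; exact hroot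
          have hne : stepP (p.set z t) z ≠ z := by rw [hq]; exact hrtz
          exact (rootRel_step hne).mpr (by rw [hq]; exact rootRel_of_isRoot hq2)
      · rw [rootAux] at h
        by_cases hfix : p.getD z z = z
        · rw [if_pos hfix] at h
          obtain rfl := Option.some.inj h
          exact rootRel_of_isRoot (by rw [stepP_set, if_neg (fun hc => hzx hc.1.symm)]; exact hfix)
        · rw [if_neg hfix] at h
          have hrec := ih _ _ h
          have hne : stepP (p.set x rt) z ≠ z := by
            rw [stepP_set, if_neg (fun hc => hzx hc.1.symm)]; exact hfix
          refine (rootRel_step hne).mpr ?_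
          rwa [stepP_set, if_neg (fun hc => hzx hc.1.symm)]
  rintro z t ⟨f, hf⟩; exact main f z t hf

theorem find_spec {n : Nat} : ∀ (f : Nat) (p : List Nat) (x s : Nat), RangeOK n p → x < n →
    rootAux f p x = some s →
    (findA f p x).1 = s ∧ RangeOK n (findA f p x).2 ∧
      (∀ z t, RootRel p z t → RootRel (findA f p x).2 z t) := by
  intro f
  induction f with
  | zero => intro p x s _ _ h; simp [rootAux] at h
  | succ f ih =>
    intro p x s hR hx h
    rw [rootAux] at h
    by_cases hfix : p.getD x x = x
    · rw [if_pos hfix] at h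
      obtain rfl := Option.some.inj h
      have hfa : findA (f+1) p x = (x, p) := by simp only [findA]; rw [if_pos hfix]
      rw [hfa]
      exact ⟨rfl, hR, fun z t ht => ht⟩
    · rw [if_neg hfix] at h
      have hpx : p.getD x x < n := hR.2 x hx
      obtain ⟨h1, hRq, hpres⟩ := ih p (p.getD x x) s hR hpx h
      have hsn : s < n := rootAux_range hRq hpx (shortRoot hRq hpx (hpres _ _ ⟨f, h⟩))
      have hrelpx : RootRel p x s := ⟨f + 1, by rw [rootAux, if_neg hfix]; exact h⟩
      have hq := (findA f p (p.getD x x)).2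
      have hxl : x < (findA f p (p.getD x x)).2.length := by rw [hRq.1]; exact hx
      have hroot_s : stepP (findA f p (p.getD x x)).2 s = s := by
        have hps : stepP p s = s := rootAux_isRoot h
        obtain ⟨g, hg⟩ := hpres _ _ (rootRel_of_isRoot hps)
        exact rootAux_isRoot hg
      have huniq : ∀ t, RootRel (findA f p (p.getD x x)).2 x t → t = s := by
        intro t ht
        exact rootRel_det ht (hpres _ _ hrelpx)
      have hset := set_preserves hxl hroot_s huniq
      simp only [findA, if_neg hfix]
      refine ⟨by rw [h1], ⟨?_, ?_⟩, ?_⟩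
      · rw [List.length_set, hRq.1]
      · intro i hi
        rw [h1, stepP_set]
        split
        · exact hsn
        · exact hRq.2 i hi
      · intro z t ht
        rw [h1]
        exact hset z t (hpres z t ht)

theorem link_spec {n : Nat} {p : List Nat} {a b : Nat} (hR : RangeOK n p)
    (ha : stepP p a = a) (hb : stepP p b = b) (hab : a ≠ b) (haN : a < n) (hbN : b < n) :
    RangeOK n (p.set a b) ∧
      (∀ z t, RootRel p z t → RootRel (p.set a b) z (if t = a then b else t)) := by
  have hal : a < p.length := by rw [hR.1]; exact haN
  constructor
  · refine ⟨by rw [List.length_set, hR.1], fun i hi => ?_⟩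
    rw [stepP_set]
    split
    · exact hbN
    · exact hR.2 i hi
  · have main : ∀ f z t, rootAux f p z = some t → RootRel (p.set a b) z (if t = a then b else t) := by
      intro f
      induction f with
      | zero => intro z t h; simp [rootAux] at h
      | succ f ih =>
        intro z t h
        rw [rootAux] at h
        have ha' : p.getD a a = a := ha
        rcases eq_or_ne z a with rfl | hza
        · rw [if_pos ha'] at h
          obtain rfl := Option.some.inj h
          rw [if_pos rfl]
          have hq : stepP (p.set z b) z = b := by rw [stepP_set, if_pos ⟨rfl, hal⟩]
          have hqb : stepP (p.set z b) b = b := by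
            rw [stepP_set, if_neg (fun hc => hab hc.1)]; exact hb
          have hne : stepP (p.set z b) z ≠ z := by rw [hq]; exact fun hc => hab hc.symm
          exact (rootRel_step hne).mpr (by rw [hq]; exact rootRel_of_isRoot hqb)
        · by_cases hfix : p.getD z z = z
          · rw [if_pos hfix] at h
            obtain rfl := Option.some.inj h
            rw [if_neg hza]
            exact rootRel_of_isRoot (by rw [stepP_set, if_neg (fun hc => hza hc.1.symm)]; exact hfix)
          · rw [if_neg hfix] at h
            have hrec := ih _ _ h
            have hne : stepP (p.set a b) z ≠ z := by
              rw [stepP_set, if_neg (fun hc => hza hc.1.symm)]; exact hfix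
            refine (rootRel_step hne).mpr ?_
            rwa [stepP_set, if_neg (fun hc => hza hc.1.symm)]
    rintro z t ⟨f, hf⟩; exact main f z t hf

theorem class_preserved {n : Nat} {p q : List Nat} (hVp : Valid n p)
    (hpres : ∀ z t, RootRel p z t → RootRel q z t) :
    ∀ i j, i < n → j < n → (SameClass q i j ↔ SameClass p i j) := by
  intro i j hi hj
  obtain ⟨ri, hri⟩ := hVp.2 i hi
  obtain ⟨rj, hrj⟩ := hVp.2 j hj
  constructor
  · rintro ⟨s, hsi, hsj⟩
    have h1 : s = ri := rootRel_det hsi (hpres _ _ hri)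
    have h2 : s = rj := rootRel_det hsj (hpres _ _ hrj)
    exact ⟨ri, hri, (h1 ▸ h2 : ri = rj) ▸ hrj⟩
  · rintro ⟨s, hsi, hsj⟩
    exact ⟨s, hpres _ _ hsi, hpres _ _ hsj⟩

theorem link_classes {n : Nat} {p q : List Nat} {x y rx ry : Nat} (hVp : Valid n p)
    (hxn : x < n) (hyn : y < n) (hrx : RootRel p x rx) (hry : RootRel p y ry) (hne : rx ≠ ry)
    (hpres : ∀ z t, RootRel p z t → RootRel q z (if t = ry then rx else t)) :
    ∀ i j, i < n → j < n →
      (SameClass q i j ↔ (SameClass p i j ∨ (SameClass p i x ∧ SameClass p j y) ∨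
        (SameClass p i y ∧ SameClass p j x))) := by
  intro i j hi hj
  obtain ⟨ri, hri⟩ := hVp.2 i hi
  obtain ⟨rj, hrj⟩ := hVp.2 j hj
  have hqi := hpres _ _ hri
  have hqj := hpres _ _ hrj
  have hclass : ∀ a b ra rb, RootRel p a ra → RootRel p b rb →
      (SameClass p a b ↔ ra = rb) := by
    intro a b ra rb hra hrb
    constructor
    · rintro ⟨s, hsa, hsb⟩
      rw [← rootRel_det hsa hra, ← rootRel_det hsb hrb]
    · rintro rfl; exact ⟨ra, hra, hrb⟩
  constructor
  · rintro ⟨s, hsi, hsj⟩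
    have h1 : s = if ri = ry then rx else ri := rootRel_det hsi hqi
    have h2 : s = if rj = ry then rx else rj := rootRel_det hsj hqj
    rw [h1] at h2
    by_cases hiy : ri = ry <;> by_cases hjy : rj = ry
    · left; exact (hclass i j ri rj hri hrj).mpr (hiy.trans hjy.symm)
    · rw [if_pos hiy, if_neg hjy] at h2
      right; right
      exact ⟨(hclass i y ri ry hri hry).mpr hiy, (hclass j x rj rx hrj hrx).mpr h2.symm⟩
    · rw [if_neg hiy, if_pos hjy] at h2
      right; left
      exact ⟨(hclass i x ri rx hri hrx).mpr h2, (hclass j y rj ry hrj hry).mpr hjy⟩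
    · rw [if_neg hiy, if_neg hjy] at h2
      left; exact (hclass i j ri rj hri hrj).mpr h2
  · intro hcase
    refine ⟨if ri = ry then rx else ri, hqi, ?_⟩
    have key : (if ri = ry then rx else ri) = (if rj = ry then rx else rj) := by
      rcases hcase with hij | ⟨hix, hjy⟩ | ⟨hiy, hjx⟩
      · rw [(hclass i j ri rj hri hrj).mp hij]
      · rw [(hclass i x ri rx hri hrx).mp hix, (hclass j y rj ry hrj hry).mp hjy]
        rw [if_neg hne, if_pos rfl]
      · rw [(hclass i y ri ry hri hry).mp hiy, (hclass j x rj rx hrj hrx).mp hjx]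
        rw [if_pos rfl, if_neg hne]
    rw [key]; exact hqj

theorem union_spec {n : Nat} {p rk : List Nat} {x y : Nat} (hV : Valid n p) (hx : x < n)
    (hy : y < n) (hne : ¬ SameClass p x y) :
    Valid n (unionA (n+1) p rk x y).1 ∧
      ∀ i j, i < n → j < n →
        (SameClass (unionA (n+1) p rk x y).1 i j ↔
          (SameClass p i j ∨ (SameClass p i x ∧ SameClass p j y) ∨
            (SameClass p i y ∧ SameClass p j x))) := by
  obtain ⟨rx, hrx⟩ := hV.2 x hx
  obtain ⟨ry, hry⟩ := hV.2 y hy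
  have hshort1 : rootAux (n+1) p x = some rx := shortRoot hV.1 hx hrx
  obtain ⟨hf1a, hRp1, hpres1⟩ := find_spec (n+1) p x rx hV.1 hx hshort1
  have hry1 : RootRel (findA (n+1) p x).2 y ry := hpres1 _ _ hry
  have hshort2 : rootAux (n+1) (findA (n+1) p x).2 y = some ry := shortRoot hRp1 hy hry1
  obtain ⟨hf2a, hRp2, hpres2⟩ := find_spec (n+1) (findA (n+1) p x).2 y ry hRp1 hy hshort2
  set p2 := (findA (n+1) (findA (n+1) p x).2 y).2 with hp2
  have hpres12 : ∀ z t, RootRel p z t → RootRel p2 z t := fun z t h => hpres2 _ _ (hpres1 _ _ h)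
  have hrxn : rx < n := rootAux_range hV.1 hx hshort1
  have hryn : ry < n := rootAux_range hRp1 hy hshort2
  have hrxy : rx ≠ ry := fun he => hne ⟨rx, hrx, he ▸ hry⟩
  have hV2 : Valid n p2 := ⟨hRp2, fun i hi => (hV.2 i hi).imp fun s hs => hpres12 _ _ hs⟩
  have hroot_rx : stepP p2 rx = rx := by
    obtain ⟨g, hg⟩ := hpres12 _ _ (rootRel_of_isRoot (rootAux_isRoot hshort1))
    exact rootAux_isRoot hg
  have hroot_ry : stepP p2 ry = ry := by
    obtain ⟨g, hg⟩ := hpres2 _ _ (rootRel_of_isRoot (rootAux_isRoot hshort2))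
    exact rootAux_isRoot hg
  have hrx2 : RootRel p2 x rx := hpres12 _ _ hrx
  have hry2 : RootRel p2 y ry := hpres12 _ _ hry
  have hcls2 := class_preserved hV hpres12
  have hu : (unionA (n+1) p rk x y).1 =
      (if rk.getD rx 0 > rk.getD ry 0 then p2.set ry rx else p2.set rx ry) := by
    simp only [unionA, hf1a, hf2a]
    split_ifs <;> rfl
  by_cases hrk : rk.getD rx 0 > rk.getD ry 0
  · rw [hu, if_pos hrk]
    obtain ⟨hRq, hpresq⟩ := link_spec hRp2 hroot_ry hroot_rx (Ne.symm hrxy) hryn hrxn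
    have hclq := link_classes hV2 hx hy hrx2 hry2 hrxy hpresq
    refine ⟨⟨hRq, fun i hi => ?_⟩, fun i j hi hj => ?_⟩
    · obtain ⟨s, hs⟩ := hV2.2 i hi
      exact ⟨_, hpresq _ _ hs⟩
    · rw [hclq i j hi hj, hcls2 i j hi hj, hcls2 i x hi hx, hcls2 j y hj hy,
        hcls2 i y hi hy, hcls2 j x hj hx]
  · rw [hu, if_neg hrk]
    obtain ⟨hRq, hpresq⟩ := link_spec hRp2 hroot_rx hroot_ry hrxy hrxn hryn
    have hclq := link_classes hV2 hy hx hry2 hrx2 (Ne.symm hrxy) hpresq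
    refine ⟨⟨hRq, fun i hi => ?_⟩, fun i j hi hj => ?_⟩
    · obtain ⟨s, hs⟩ := hV2.2 i hi
      exact ⟨_, hpresq _ _ hs⟩
    · rw [hclq i j hi hj, hcls2 i j hi hj, hcls2 i x hi hx, hcls2 j y hj hy,
        hcls2 i y hi hy, hcls2 j x hj hx]
      tauto

def pidx (n : Nat) (i : Int) : Nat := if i < 0 then (i + n).toNat else i.toNat

theorem pidx_lt {n : Nat} {i : Int} (h1 : -(n : Int) ≤ i) (h2 : i < n) : pidx n i < n := by
  unfold pidx; split_ifs <;> omega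

theorem pyIdx_eq {n : Nat} {i : Int} (h1 : -(n : Int) ≤ i) (h2 : i < n) :
    PySem.List.pyIdx? n i = some (pidx n i) := by
  by_cases h0 : 0 ≤ i
  · simp [PySem.List.pyIdx?, pidx, h0, h2, (by omega : ¬ i < 0)]
  · simp only [PySem.List.pyIdx?, pidx, if_neg h0, if_pos h1, if_pos (by omega : i < 0)]
    congr 1
    omega

theorem pyGetD_pidx {α : Type} (xs : List α) (n : Nat) (i : Int) (d : α) (hlen : xs.length = n)
    (h1 : -(n : Int) ≤ i) (h2 : i < n) : PySem.List.pyGetD xs i d = xs.getD (pidx n i) d := by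
  subst hlen
  simp [PySem.List.pyGetD, PySem.List.pyGet?, pyIdx_eq h1 h2, List.getD_eq_getElem?_getD]

theorem rangeGetD {n k : Nat} (hk : k < n) : (List.range n).getD k 0 = k := by
  simp [List.getD_eq_getElem?_getD, List.getElem?_range, hk]

theorem range_fix (n i : Nat) : stepP (List.range n) i = i := by
  unfold stepP
  by_cases h : i < n
  · simp [List.getD_eq_getElem?_getD, List.getElem?_range, h]
  · rw [List.getD_eq_default _ _ (by simpa using by omega : (List.range n).length ≤ i)]

theorem sameClass_iff_roots {p : List Nat} {a b ra rb : Nat} (hra : RootRel p a ra)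
    (hrb : RootRel p b rb) : SameClass p a b ↔ ra = rb := by
  constructor
  · rintro ⟨s, hsa, hsb⟩
    rw [← rootRel_det hsa hra, ← rootRel_det hsb hrb]
  · rintro rfl; exact ⟨ra, hra, hrb⟩

def UFRel (n : Nat) (p : List Nat) (comp : List Int) : Prop :=
  Valid n p ∧ comp.length = n ∧
    ∀ i j, i < n → j < n → (SameClass p i j ↔ comp.getD i 0 = comp.getD j 0)

theorem pyRangeGetD {n i : Nat} (hi : i < n) : (PySem.List.pyRange 0 n 1).getD i 0 = (i : Int) := by
  have hl : i < (PySem.List.pyRange 0 (n : Int) 1).length := by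
    rw [PySem.List.length_pyRange_one]; omega
  rw [List.getD_eq_getElem?_getD, List.getElem?_eq_getElem hl]
  simp [PySem.List.getElem_pyRange_one]

theorem init_UFRel (n : Nat) : UFRel n (List.range n) (PySem.List.pyRange 0 n 1) := by
  refine ⟨⟨⟨List.length_range, fun i hi => by rw [range_fix]; exact hi⟩,
    fun i _ => ⟨i, rootRel_of_isRoot (range_fix n i)⟩⟩,
    by rw [PySem.List.length_pyRange_one]; omega, fun i j hi hj => ?_⟩
  rw [sameClass_iff_roots (rootRel_of_isRoot (range_fix n i)) (rootRel_of_isRoot (range_fix n j)),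
    pyRangeGetD hi, pyRangeGetD hj]
  exact ⟨fun h => by exact_mod_cast h, fun h => by exact_mod_cast h⟩

theorem getD_map_lt (comp : List Int) (φ : Int → Int) {i : Nat} (hi : i < comp.length) :
    (comp.map φ).getD i 0 = φ (comp.getD i 0) := by
  rw [List.getD_eq_getElem?_getD, List.getD_eq_getElem?_getD, List.getElem?_map,
    List.getElem?_eq_getElem hi]
  rfl

theorem label_merge {cu cv ci cj : Int} (h : cu ≠ cv) :
    ((if ci = cv then cu else ci) = (if cj = cv then cu else cj)) ↔
      (ci = cj ∨ (ci = cu ∧ cj = cv) ∨ (ci = cv ∧ cj = cu)) := by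
  split_ifs <;> omega

def EdgeOK (n : Nat) (e : Int × Int × Int) : Prop :=
  0 ≤ e.1 ∧ e.1 < (n : Int) ∧ -(n : Int) ≤ e.2.1 ∧ e.2.1 < (n : Int)

theorem mst_step {n : Nat} {p rk : List Nat} {comp : List Int} {ms res : Int} {fl : Bool}
    (hUF : UFRel n p comp) (e : Int × Int × Int) (he : EdgeOK n e) :
    UFRel n (kruskalStep n (p, rk, ms, fl) e).1 (mstStepB (comp, res, fl) e).1 ∧
    (kruskalStep n (p, rk, ms, fl) e).2.2.2 = (mstStepB (comp, res, fl) e).2.2 ∧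
    (kruskalStep n (p, rk, ms, fl) e).2.2.1 + (mstStepB (comp, res, fl) e).2.1
      = ms + res + e.2.2 := by
  obtain ⟨hV, hclen, hiff⟩ := hUF
  obtain ⟨hu0, hu1, hv0, hv1⟩ := he
  have hnu : pidx n e.1 < n := pidx_lt (by omega) hu1
  have hnv : pidx n e.2.1 < n := pidx_lt hv0 hv1
  have hA_u : PySem.List.pyGetD (List.range n) e.1 0 = pidx n e.1 := by
    rw [pyGetD_pidx _ n _ _ List.length_range (by omega) hu1, rangeGetD hnu]
  have hA_v : PySem.List.pyGetD (List.range n) e.2.1 0 = pidx n e.2.1 := by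
    rw [pyGetD_pidx _ n _ _ List.length_range hv0 hv1, rangeGetD hnv]
  have hB_u : PySem.List.pyGetD comp e.1 0 = comp.getD (pidx n e.1) 0 :=
    pyGetD_pidx _ n _ _ hclen (by omega) hu1
  have hB_v : PySem.List.pyGetD comp e.2.1 0 = comp.getD (pidx n e.2.1) 0 :=
    pyGetD_pidx _ n _ _ hclen hv0 hv1
  set nu := pidx n e.1
  set nv := pidx n e.2.1
  set cu := comp.getD nu 0 with hcu
  set cv := comp.getD nv 0 with hcv
  obtain ⟨ru, hru⟩ := hV.2 nu hnu
  obtain ⟨rv, hrv⟩ := hV.2 nv hnv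
  have hshort1 : rootAux (n+1) p nu = some ru := shortRoot hV.1 hnu hru
  obtain ⟨hf1a, hRp1, hpres1⟩ := find_spec (n+1) p nu ru hV.1 hnu hshort1
  have hrv1 : RootRel (findA (n+1) p nu).2 nv rv := hpres1 _ _ hrv
  have hshort2 : rootAux (n+1) (findA (n+1) p nu).2 nv = some rv := shortRoot hRp1 hnv hrv1
  obtain ⟨hf2a, hRp2, hpres2⟩ := find_spec (n+1) (findA (n+1) p nu).2 nv rv hRp1 hnv hshort2
  set p1 := (findA (n+1) p nu).2 with hp1
  set p2 := (findA (n+1) p1 nv).2 with hp2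
  have hpres12 : ∀ z t, RootRel p z t → RootRel p2 z t := fun z t h => hpres2 _ _ (hpres1 _ _ h)
  have hV2 : Valid n p2 := ⟨hRp2, fun i hi => (hV.2 i hi).imp fun s hs => hpres12 _ _ hs⟩
  have hcls2 := class_preserved hV hpres12
  have hroots : SameClass p nu nv ↔ ru = rv := sameClass_iff_roots hru hrv
  have hcucv : (ru = rv) ↔ cu = cv := by rw [← hroots]; exact hiff nu nv hnu hnv
  simp only [kruskalStep, mstStepB, hA_u, hA_v, hB_u, hB_v, ← hp1, ← hp2, hf1a, hf2a]
  by_cases hrr : ru = rv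
  · have hcc : cu = cv := hcucv.mp hrr
    have hUF2 : UFRel n p2 comp := ⟨hV2, hclen, fun i j hi hj => by
      rw [hcls2 i j hi hj]; exact hiff i j hi hj⟩
    rw [if_neg (not_not_intro hrr), if_neg (not_not_intro hcc)]
    cases fl with
    | false =>
        rw [if_pos rfl, if_neg (by simp)]
        exact ⟨hUF2, rfl, by ring⟩
    | true =>
        rw [if_neg (by simp), if_pos rfl]
        exact ⟨hUF2, rfl, by ring⟩
  · have hcne : cu ≠ cv := fun h => hrr (hcucv.mpr h)
    rw [if_pos hrr, if_pos hcne]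
    have hnsame2 : ¬ SameClass p2 nu nv := fun h => hrr (hroots.mp ((hcls2 nu nv hnu hnv).mp h))
    obtain ⟨hVq, hclq⟩ := union_spec (rk := rk) hV2 hnu hnv hnsame2
    refine ⟨⟨hVq, by simpa using hclen, fun i j hi hj => ?_⟩, rfl, by ring⟩
    rw [hclq i j hi hj]
    have hilen : i < comp.length := by omega
    have hjlen : j < comp.length := by omega
    rw [getD_map_lt comp _ hilen, getD_map_lt comp _ hjlen]
    rw [label_merge hcne]
    rw [hcls2 i j hi hj, hcls2 i nu hi hnu, hcls2 j nv hj hnv, hcls2 i nv hi hnv,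
      hcls2 j nu hj hnu, hiff i j hi hj, hiff i nu hi hnu, hiff j nv hj hnv,
      hiff i nv hi hnv, hiff j nu hj hnu]

def BuildInv (n : Nat) (sa : List (List Bool) × List (Int × Int × Int) × Int)
    (sb : List (List Bool) × List (Int × Int × Int)) : Prop :=
  sb.1 = sa.1 ∧ sb.2 = sa.2.1 ∧ sa.2.2 = (sa.2.1.map (·.2.2)).sum ∧ (∀ e ∈ sa.2.1, EdgeOK n e)

theorem build_inner_step {n : Nat} {u : Int}
    {sa : List (List Bool) × List (Int × Int × Int) × Int}
    {sb : List (List Bool) × List (Int × Int × Int)}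
    (hu0 : 0 ≤ u) (hu : u < (n : Int))
    (vw : Int × Int) (hv1 : -(n : Int) ≤ vw.1) (hv2 : vw.1 < (n : Int))
    (h : BuildInv n sa sb) : BuildInv n (buildInnerA u sa vw) (buildInnerB u sb vw) := by
  obtain ⟨hM, hE, hallw, hedge⟩ := h
  dsimp only [buildInnerA, buildInnerB]
  rw [hM, hE]
  by_cases hg : PySem.List.pyGetD (PySem.List.pyGetD sa.1 u []) vw.1 false
  · rw [if_pos hg, if_pos hg]
    exact ⟨hM, hE, hallw, hedge⟩
  · rw [if_neg hg, if_neg hg]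
    refine ⟨rfl, rfl, ?_, ?_⟩
    · simp only [List.map_append, List.sum_append, List.map_cons, List.map_nil]
      simp [hallw]
    · intro e he
      rcases List.mem_append.mp he with he | he
      · exact hedge e he
      · rw [List.mem_singleton.mp he]
        exact ⟨hu0, hu, show -(n:Int) ≤ vw.1 by omega, hv2⟩

theorem mst_fold_pack {n : Nat} : ∀ (L : List (Int × Int × Int)) (p rk : List Nat)
    (comp : List Int) (ms res : Int) (fl : Bool), UFRel n p comp → (∀ e ∈ L, EdgeOK n e) →
    UFRel n (L.foldl (kruskalStep n) (p, rk, ms, fl)).1 (L.foldl mstStepB (comp, res, fl)).1 ∧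
    (L.foldl (kruskalStep n) (p, rk, ms, fl)).2.2.2 = (L.foldl mstStepB (comp, res, fl)).2.2 ∧
    (L.foldl (kruskalStep n) (p, rk, ms, fl)).2.2.1 + (L.foldl mstStepB (comp, res, fl)).2.1
      = ms + res + (L.map (·.2.2)).sum := by
  intro L
  induction L with
  | nil => intro p rk comp ms res fl hUF _; exact ⟨hUF, rfl, by simp⟩
  | cons e L ih =>
    intro p rk comp ms res fl hUF hE
    obtain ⟨h1, h2, h3⟩ := mst_step hUF e (hE e List.mem_cons_self)
    have ihh := ih (kruskalStep n (p, rk, ms, fl) e).1 (kruskalStep n (p, rk, ms, fl) e).2.1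
      (mstStepB (comp, res, fl) e).1 (kruskalStep n (p, rk, ms, fl) e).2.2.1
      (mstStepB (comp, res, fl) e).2.1 (kruskalStep n (p, rk, ms, fl) e).2.2.2
      h1 (fun e' he' => hE e' (List.mem_cons_of_mem _ he'))
    rw [List.foldl_cons, List.foldl_cons]
    have eqA : kruskalStep n (p, rk, ms, fl) e =
        ((kruskalStep n (p, rk, ms, fl) e).1, (kruskalStep n (p, rk, ms, fl) e).2.1,
          (kruskalStep n (p, rk, ms, fl) e).2.2.1, (kruskalStep n (p, rk, ms, fl) e).2.2.2) := rfl
    have eqB : mstStepB (comp, res, fl) e =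
        ((mstStepB (comp, res, fl) e).1, (mstStepB (comp, res, fl) e).2.1,
          (kruskalStep n (p, rk, ms, fl) e).2.2.2) := by rw [h2]
    rw [eqA, eqB]
    refine ⟨ihh.1, ihh.2.1, ?_⟩
    rw [ihh.2.2]
    simp only [List.map_cons, List.sum_cons]
    linarith [h3]

theorem build_inner_fold {n : Nat} {u : Int} (hu0 : 0 ≤ u) (hu : u < (n : Int)) :
    ∀ (row : List (Int × Int)) sa sb,
      (∀ vw ∈ row, -(n : Int) ≤ vw.1 ∧ vw.1 < (n : Int)) → BuildInv n sa sb →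
      BuildInv n (row.foldl (buildInnerA u) sa) (row.foldl (buildInnerB u) sb) := by
  intro row
  induction row with
  | nil => intro sa sb _ h; exact h
  | cons vw row ih =>
    intro sa sb hb h
    rw [List.foldl_cons, List.foldl_cons]
    exact ih _ _ (fun vw' hvw' => hb vw' (List.mem_cons_of_mem _ hvw'))
      (build_inner_step hu0 hu vw (hb vw List.mem_cons_self).1 (hb vw List.mem_cons_self).2 h)

theorem build_outer_fold {G : List (List (Int × Int))} (hpre : Pre_lufthansa G) :
    ∀ (us : List Int) sa sb, (∀ u ∈ us, 0 ≤ u ∧ u < (G.length : Int)) →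
      BuildInv G.length sa sb →
      BuildInv G.length (us.foldl (buildOuterA G) sa) (us.foldl (buildOuterB G) sb) := by
  intro us
  induction us with
  | nil => intro sa sb _ h; exact h
  | cons u us ih =>
    intro sa sb hb h
    rw [List.foldl_cons, List.foldl_cons]
    obtain ⟨hu0, hu1⟩ := hb u List.mem_cons_self
    have hg : PySem.List.pyGetD G u [] = G.getD (pidx G.length u) [] :=
      pyGetD_pidx _ G.length _ _ rfl (by omega) hu1
    have hpil : pidx G.length u < G.length := pidx_lt (by omega) hu1
    have hmemrow : G.getD (pidx G.length u) [] ∈ G := by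
      rw [List.getD_eq_getElem?_getD, List.getElem?_eq_getElem hpil]
      exact List.getElem_mem hpil
    have hrowb : ∀ vw ∈ PySem.List.pyGetD G u [],
        -(G.length : Int) ≤ vw.1 ∧ vw.1 < (G.length : Int) := by
      rw [hg]; exact fun vw hvw => hpre _ hmemrow vw hvw
    exact ih _ _ (fun u' hu' => hb u' (List.mem_cons_of_mem _ hu'))
      (build_inner_fold hu0 hu1 _ sa sb hrowb h)

theorem build_init (n : Nat) :
    BuildInv n (List.replicate n (List.replicate n false), [], 0)
      (List.replicate n (List.replicate n false), []) := by
  exact ⟨rfl, rfl, rfl, by simp⟩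

theorem mem_pyRange_bounds {n : Nat} {u : Int} (h : u ∈ PySem.List.pyRange 0 n 1) :
    0 ≤ u ∧ u < (n : Int) := by
  have := (PySem.List.mem_pyRange_one).mp h
  omega

theorem lufthansa_eq (G : List (List (Int × Int))) (hpre : Pre_lufthansa G) :
    lufthansa G = lufthansa_alt G := by
  have hB := build_outer_fold hpre (PySem.List.pyRange 0 G.length 1)
    (List.replicate G.length (List.replicate G.length false), [], 0)
    (List.replicate G.length (List.replicate G.length false), [])
    (fun u hu => mem_pyRange_bounds hu) (build_init G.length)
  set sa := (PySem.List.pyRange 0 G.length 1).foldl (buildOuterA G)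
    (List.replicate G.length (List.replicate G.length false), [], 0) with hsa
  set sb := (PySem.List.pyRange 0 G.length 1).foldl (buildOuterB G)
    (List.replicate G.length (List.replicate G.length false), []) with hsb
  obtain ⟨_, hE, hallw, hedge⟩ := hB
  set es := PySem.List.sorted sa.2.1 (fun e => e.2.2) false with hes
  have hesB : PySem.List.sorted sb.2 (fun e => e.2.2) false = es := by rw [hE, hes]
  have hedge_es : ∀ e ∈ es.reverse, EdgeOK G.length e := by
    intro e he
    have hperm := PySem.List.sorted_perm sa.2.1 (fun e : Int × Int × Int => e.2.2) false
    exact hedge e (hperm.mem_iff.mp (List.mem_reverse.mp he))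
  have hsum : ((es.reverse.map (·.2.2)).sum : Int) = sa.2.2 := by
    rw [List.map_reverse, List.sum_reverse, hallw]
    exact (List.Perm.map (fun e : Int × Int × Int => e.2.2)
      (PySem.List.sorted_perm sa.2.1 (fun e : Int × Int × Int => e.2.2) false)).sum_eq
  obtain ⟨_, _, hms⟩ := mst_fold_pack es.reverse (List.range G.length)
    (List.replicate G.length 0) (PySem.List.pyRange 0 G.length 1) 0 0 false
    (init_UFRel G.length) hedge_es
  show sa.2.2 - kruskalA es G.length = _
  rw [show lufthansa_alt G = (es.reverse.foldl mstStepB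
    (PySem.List.pyRange 0 G.length 1, 0, false)).2.1 by rw [lufthansa_alt]; rw [← hsb, hesB]]
  unfold kruskalA
  omega

-- ===== VERDICT (by name: the statement is the Claim_ definition above) =====
theorem lufthansa_spec : Claim_equal_lufthansa := by
  intro G _ hpre
  unfold Spec_lufthansa
  exact lufthansa_eq G hpre
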